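-- pv_equiv track=rewrite | github.com/zhomanatr/algo | lesson2.py | printMinWords
-- ===== SOURCE A (Python) =====
-- def printMinWords(text):
--     minLen = len(text[0])
--
--     for word in text:
--         if len(word) < minLen:
--             minLen = len(word)
--     ans = []
--     for word in text:
--         if len(word) == minLen:
--             ans.append(word)
--     return ' '.join(ans)
-- ===== SOURCE B (Python) =====
-- def printMinWords(text):
--     minLen = len(text[0])
--     ans = []
--     for word in text:
--         L = len(word)
--         if L < minLen:
--             minLen = L
--             ans = [word]
--         elif L == minLen:
--             ans.append(word)
--     return ' '.join(ans)
-- ===== Notes on version B (the rewrite author's own statement) =====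
-- stated objective: alternative
-- what changed: A's two separate passes (min-length reduction, then filter) are fused into one accumulator-with-reset pass maintaining both the running minimum and the current answer list.
import Mathlib
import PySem

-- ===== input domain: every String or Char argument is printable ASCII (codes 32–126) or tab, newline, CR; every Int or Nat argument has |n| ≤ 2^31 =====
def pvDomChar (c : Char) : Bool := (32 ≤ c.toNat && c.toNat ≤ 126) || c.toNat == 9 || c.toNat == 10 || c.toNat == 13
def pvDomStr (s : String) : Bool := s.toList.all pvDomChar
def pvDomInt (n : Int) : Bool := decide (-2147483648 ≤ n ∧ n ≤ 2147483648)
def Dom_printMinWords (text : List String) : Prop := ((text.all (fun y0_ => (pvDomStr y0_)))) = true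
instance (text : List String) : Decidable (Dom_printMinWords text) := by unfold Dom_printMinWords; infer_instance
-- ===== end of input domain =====

-- B fuses A's two passes (min-length reduction, then filter) into a single
-- accumulator-with-reset pass; same return value on every nonempty input.

-- ===== PORT A =====
-- text[0] raises IndexError on []; that input is excluded by Pre_ (the .getD "" is unreachable inside Pre_)
def printMinWords (text : List String) : String :=
  let minLen :=
    text.foldl (fun m word => if PySem.Str.len word < m then PySem.Str.len word else m)
      (PySem.Str.len ((PySem.List.pyGet? text 0).getD ""))
  let ans :=
    text.foldl (fun acc word => if PySem.Str.len word == minLen then acc ++ [word] else acc) []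
  PySem.Str.join " " ans

-- ===== PORT B =====
-- loop body of B's single fused pass
def pvStep (p : Int × List String) (word : String) : Int × List String :=
  let L := PySem.Str.len word
  if L < p.1 then (L, [word])
  else if L == p.1 then (p.1, p.2 ++ [word])
  else p

def printMinWords_alt (text : List String) : String :=
  let st := text.foldl pvStep (PySem.Str.len ((PySem.List.pyGet? text 0).getD ""), [])
  PySem.Str.join " " st.2

-- ===== PRECONDITION & SPEC =====
-- Pre_ excludes the empty list, on which Python A raises IndexError (text[0]).
def Pre_printMinWords (text : List String) : Prop := text ≠ []
instance (text : List String) : Decidable (Pre_printMinWords text) := by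
  unfold Pre_printMinWords; infer_instance
def pvWitness_printMinWords : List String := ["ab", "c", "de"]
def Spec_printMinWords (text : List String) (out : String) : Prop := out = printMinWords_alt text
instance (text : List String) (out : String) : Decidable (Spec_printMinWords text out) := by
  unfold Spec_printMinWords; infer_instance

-- ===== CLAIM (what is proved, stated in full; the proofs are below) =====
def Claim_equal_printMinWords : Prop := ∀ (text : List String), Dom_printMinWords text → Pre_printMinWords text → Spec_printMinWords text (printMinWords text)

-- ===== LEMMAS AND PROOFS =====

-- A's min-reduction loop
def pvMinF (l : List String) (m : Int) : Int :=
  l.foldl (fun m word => if PySem.Str.len word < m then PySem.Str.len word else m) m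

lemma pvMinF_le (l : List String) (m : Int) : pvMinF l m ≤ m := by
  induction l generalizing m with
  | nil => simp [pvMinF]
  | cons w t ih =>
    simp only [pvMinF, List.foldl_cons]
    split_ifs with h
    · exact le_of_lt (lt_of_le_of_lt (ih _) h)
    · exact ih m

lemma pvMinF_cons (w : String) (t : List String) (m : Int) :
    pvMinF (w :: t) m = pvMinF t (if PySem.Str.len w < m then PySem.Str.len w else m) := rfl

-- B's fused loop, characterised: first component is A's running minimum, second is
-- the filter of the whole list by the final minimum (prefixed by acc when no reset occurred).
lemma pvFused_eq (l : List String) (m : Int) (acc : List String) :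
    l.foldl pvStep (m, acc)
    = (pvMinF l m,
       (if pvMinF l m = m then acc else []) ++
         l.filter (fun word => PySem.Str.len word == pvMinF l m)) := by
  induction l generalizing m acc with
  | nil => simp [pvMinF]
  | cons w t ih =>
    rw [List.foldl_cons]
    by_cases h1 : PySem.Str.len w < m
    · have hs : pvStep (m, acc) w = (PySem.Str.len w, [w]) := by
        simp only [pvStep]; rw [if_pos h1]
      rw [hs, ih, pvMinF_cons, if_pos h1]
      have hle := pvMinF_le t (PySem.Str.len w)
      have hne : ¬ pvMinF t (PySem.Str.len w) = m := by omega
      rw [if_neg hne, List.filter_cons]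
      by_cases h2 : pvMinF t (PySem.Str.len w) = PySem.Str.len w
      · have hc : (PySem.Str.len w == pvMinF t (PySem.Str.len w)) = true := by
          rw [beq_iff_eq]; omega
        rw [hc]; simp at h2; simp [h2]
      · have hc : (PySem.Str.len w == pvMinF t (PySem.Str.len w)) = false := by
          rw [beq_eq_false_iff_ne]; omega
        rw [hc]; simp at h2; simp [h2]
    · by_cases h2 : PySem.Str.len w = m
      · have hs : pvStep (m, acc) w = (m, acc ++ [w]) := by
          simp only [pvStep]; rw [if_neg h1, if_pos (by rw [beq_iff_eq]; exact h2)]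
        rw [hs, ih, pvMinF_cons, if_neg h1, List.filter_cons]
        by_cases h3 : pvMinF t m = m
        · have hc : (PySem.Str.len w == pvMinF t m) = true := by
            rw [beq_iff_eq]; omega
          rw [hc]; simp [h3]
        · have hle := pvMinF_le t m
          have hc : (PySem.Str.len w == pvMinF t m) = false := by
            rw [beq_eq_false_iff_ne]; omega
          rw [hc]; simp [h3]
      · have hs : pvStep (m, acc) w = (m, acc) := by
          simp only [pvStep]
          rw [if_neg h1, if_neg (by rw [beq_iff_eq]; exact h2)]
        rw [hs, ih, pvMinF_cons, if_neg h1, List.filter_cons]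
        have hle := pvMinF_le t m
        have hgt : m < PySem.Str.len w := lt_of_le_of_ne (not_lt.mp h1) (fun he => h2 he.symm)
        have hc : (PySem.Str.len w == pvMinF t m) = false := by
          rw [beq_eq_false_iff_ne]; omega
        rw [hc]; simp

-- ===== VERDICT (by name: the statement is the Claim_ definition above) =====
theorem printMinWords_spec : Claim_equal_printMinWords := by
  intro text _ _
  show printMinWords text = printMinWords_alt text
  unfold printMinWords printMinWords_alt
  rw [pvFused_eq]
  show PySem.Str.join " " (text.foldl (fun acc word => if PySem.Str.len word == pvMinF text (PySem.Str.len ((PySem.List.pyGet? text 0).getD "")) then acc ++ [word] else acc) []) = _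
  rw [PySem.List.foldl_append_if_eq_filter]
  simp
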